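-- pv_equiv track=rewrite | github.com/ShinShunShan/chit | ass4/ass4B.py | decrypt_letters
-- ===== SOURCE A (Python) =====
-- def char_key(session_key: int, pos: int) -> int:
--     """
--     Derive a small per-character key value (0..25) from the integer session key and position.
--     Mirrors Java's shift & masking:
--       shift = (pos * 7) % 32
--       v = (sessionKey >>> shift) & 0x1F
--       return v % 26
--     """
--     shift = (pos * 7) % 32
--     v = (session_key >> shift) & 0x1F  # 0..31
--     return v % 26  # 0..25
--
-- def decrypt_letters(cipher: str, session_key: int) -> str:
--     """
--     Decrypt ciphertext letters -> recover plaintext letters.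
--     For each ciphertext char encVal (0..25):
--       brute-force val in 0..25 such that (val ^ k) mod 26 == encVal
--     """
--     out = []
--     for i, ch in enumerate(cipher):
--         enc_val = ord(ch) - ord('A')
--         k = char_key(session_key, i)
--         recovered = -1
--         for val in range(26):
--             xor_val = val ^ k
--             if xor_val % 26 == enc_val:
--                 recovered = val
--                 break
--         if recovered == -1:
--             recovered = 0  # fallback; should not happen with correct algebra
--         out.append(chr(recovered + ord('A')))
--     return ''.join(out)
-- ===== SOURCE B (Python) =====
-- def char_key(session_key: int, pos: int) -> int:
--     shift = (pos * 7) % 32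
--     v = (session_key >> shift) & 0x1F
--     return v % 26
--
-- def decrypt_letters(cipher: str, session_key: int) -> str:
--     chars = []
--     for i, ch in enumerate(cipher):
--         enc_val = ord(ch) - ord('A')
--         k = char_key(session_key, i)
--         # closed-form inverse of val -> (val ^ k) % 26 on 0..25:
--         # any preimage xors to enc_val or enc_val + 26
--         cands = [c for c in (enc_val ^ k, (enc_val + 26) ^ k)
--                  if 0 <= c < 26 and (c ^ k) % 26 == enc_val]
--         recovered = min(cands) if cands else 0
--         chars.append(chr(recovered + ord('A')))
--     return ''.join(chars)
-- ===== Notes on version B (the rewrite author's own statement) =====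
-- stated objective: faster
-- what changed: Replaced the inner 26-iteration brute-force search per character with a closed-form XOR inverse that tests at most two candidates (enc_val^k and (enc_val+26)^k) and takes the minimum valid one, 0 if none.
import Mathlib
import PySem

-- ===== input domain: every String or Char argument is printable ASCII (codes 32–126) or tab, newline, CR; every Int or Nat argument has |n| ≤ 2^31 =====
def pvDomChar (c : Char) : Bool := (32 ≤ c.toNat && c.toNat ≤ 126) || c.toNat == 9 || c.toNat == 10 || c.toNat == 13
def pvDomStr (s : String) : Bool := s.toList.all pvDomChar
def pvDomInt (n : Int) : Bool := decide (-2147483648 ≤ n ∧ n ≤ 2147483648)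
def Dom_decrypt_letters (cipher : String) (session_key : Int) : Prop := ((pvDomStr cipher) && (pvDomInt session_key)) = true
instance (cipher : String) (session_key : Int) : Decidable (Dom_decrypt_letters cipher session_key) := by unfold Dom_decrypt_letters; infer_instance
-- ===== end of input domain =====

-- B is simpler: the 26-iteration brute-force inner loop is replaced by a closed-form
-- inverse producing at most two XOR candidates (minimum valid one, 0 if none).

-- ===== PORT A =====
-- shared module helper char_key (used by both Python versions verbatim)
def char_key (session_key : Int) (pos : Int) : Int :=
  let shift := PySem.Int.mod (pos * 7) 32
  let v := PySem.Int.band (session_key >>> shift.toNat) 31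
  PySem.Int.mod v 26

-- inner brute-force loop of A: first val in the list with (val ^ k) % 26 == enc, else -1
def pvBrute (vals : List Int) (k enc : Int) : Int :=
  match vals with
  | [] => -1
  | v :: rest =>
      if PySem.Int.mod (PySem.Int.bxor v k) 26 = enc then v else pvBrute rest k enc

def pvRecoverA (enc k : Int) : Int :=
  let r0 := pvBrute (PySem.List.pyRange 0 26 1) k enc
  if r0 = -1 then 0 else r0

def decrypt_letters (cipher : String) (session_key : Int) : String :=
  String.ofList ((PySem.List.enumerate cipher.toList).foldl
    (fun out (p : Int × Char) =>
      let enc : Int := (p.2.toNat : Int) - 65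
      let k := char_key session_key p.1
      out ++ [Char.ofNat (pvRecoverA enc k + 65).toNat]) [])

-- ===== PORT B =====
def pvRecoverB (enc k : Int) : Char :=
  let cands := [PySem.Int.bxor enc k, PySem.Int.bxor (enc + 26) k].filter
    (fun c => decide (0 ≤ c) && decide (c < 26) &&
              (PySem.Int.mod (PySem.Int.bxor c k) 26 == enc))
  let r := match PySem.List.min? cands (fun c => c) with
    | some m => m
    | none => 0
  Char.ofNat (r + 65).toNat

def decrypt_letters_alt (cipher : String) (session_key : Int) : String :=
  String.ofList ((PySem.List.enumerate cipher.toList).map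
    (fun p : Int × Char => pvRecoverB ((p.2.toNat : Int) - 65) (char_key session_key p.1)))

-- ===== PRECONDITION & SPEC =====
def Spec_decrypt_letters (cipher : String) (session_key : Int) (out : String) : Prop := out = decrypt_letters_alt cipher session_key
instance (cipher : String) (session_key : Int) (out : String) : Decidable (Spec_decrypt_letters cipher session_key out) := by unfold Spec_decrypt_letters; infer_instance

-- ===== CLAIM (what is proved, stated in full; the proofs are below) =====
def Claim_equal_decrypt_letters : Prop := ∀ (cipher : String) (session_key : Int), Dom_decrypt_letters cipher session_key → Spec_decrypt_letters cipher session_key (decrypt_letters cipher session_key)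

-- ===== LEMMAS AND PROOFS =====

-- per-character agreement on all codes the domain admits and all key values char_key produces
set_option maxRecDepth 40000 in
lemma pv_recover_eq : ∀ c : Nat, c ≤ 126 → ∀ k : Nat, k < 26 →
    Char.ofNat (pvRecoverA ((c : Int) - 65) (k : Int) + 65).toNat
      = pvRecoverB ((c : Int) - 65) (k : Int) := by
  decide

lemma char_key_bounds (session_key pos : Int) :
    0 ≤ char_key session_key pos ∧ char_key session_key pos < 26 := by
  unfold char_key
  exact ⟨PySem.Int.mod_nonneg _ (by norm_num), PySem.Int.mod_lt _ (by norm_num)⟩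

-- ===== VERDICT (by name: the statement is the Claim_ definition above) =====
theorem decrypt_letters_spec : Claim_equal_decrypt_letters := by
  intro cipher session_key hdom
  unfold Spec_decrypt_letters decrypt_letters decrypt_letters_alt
  rw [PySem.List.foldl_append_singleton_eq_map]
  congr 1
  apply List.map_congr_left
  intro p hp
  have hmem : p.2 ∈ cipher.toList := by
    have h2 : p.2 ∈ (PySem.List.enumerate cipher.toList 0).map (·.2) :=
      List.mem_map_of_mem hp
    rwa [PySem.List.map_snd_enumerate] at h2
  have hch : pvDomChar p.2 = true := by
    have hstr : pvDomStr cipher = true := by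
      unfold Dom_decrypt_letters at hdom
      simp only [Bool.and_eq_true] at hdom
      exact hdom.1
    exact List.all_eq_true.mp hstr _ hmem
  have hc : p.2.toNat ≤ 126 := by
    unfold pvDomChar at hch
    simp only [Bool.or_eq_true, Bool.and_eq_true, beq_iff_eq, decide_eq_true_eq] at hch
    omega
  obtain ⟨hk0, hk26⟩ := char_key_bounds session_key p.1
  have hkeq : char_key session_key p.1 = ((char_key session_key p.1).toNat : Int) := by
    omega
  have hklt : (char_key session_key p.1).toNat < 26 := by omega
  show Char.ofNat (pvRecoverA ((p.2.toNat : Int) - 65) (char_key session_key p.1) + 65).toNat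
      = pvRecoverB ((p.2.toNat : Int) - 65) (char_key session_key p.1)
  rw [hkeq]
  exact pv_recover_eq p.2.toNat hc _ hklt
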